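-- pv_equiv track=rewrite | github.com/unculturedbacterium/GWAS-pipeline-dominance | gwas/bam_variant_graph.py | _md_mismatches_fast
-- ===== SOURCE A (Python) =====
-- from typing import Any, Dict, Iterable, List, Optional, Sequence, Tuple, Union
--
-- def _md_mismatches_fast(md: str) -> List[Tuple[int, str]]:
--     out: List[Tuple[int, str]] = []
--     ref_off = 0
--     i = 0
--     n = len(md)
--     while i < n:
--         c = md[i]
--         oc = ord(c)
--         if 48 <= oc <= 57:
--             num = 0
--             while i < n:
--                 oc2 = ord(md[i])
--                 if 48 <= oc2 <= 57:
--                     num = num * 10 + (oc2 - 48)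
--                     i += 1
--                 else:
--                     break
--             ref_off += num
--             continue
--         if c == "^":
--             i += 1
--             start = i
--             while i < n:
--                 oc2 = ord(md[i])
--                 if (65 <= oc2 <= 90) or (97 <= oc2 <= 122):
--                     i += 1
--                 else:
--                     break
--             ref_off += (i - start)
--             continue
--         if (65 <= oc <= 90) or (97 <= oc <= 122):
--             out.append((ref_off, c))
--             ref_off += 1
--             i += 1
--             continue
--         i += 1
--     return out
-- ===== SOURCE B (Python) =====
-- def _md_mismatches_fast(md):
--     # Phase 1: tokenize the MD string into (kind, value) tokens.
--     tokens = []
--     i, n = 0, len(md)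
--     while i < n:
--         c = md[i]
--         if c.isdigit():
--             j = i + 1
--             while j < n and md[j].isdigit():
--                 j += 1
--             tokens.append(('N', int(md[i:j])))
--             i = j
--         elif c == '^' and i + 1 < n and md[i + 1].isalpha():
--             j = i + 1
--             while j < n and md[j].isalpha():
--                 j += 1
--             tokens.append(('D', j - i - 1))
--             i = j
--         elif c.isalpha():
--             tokens.append(('S', c))
--             i += 1
--         else:
--             i += 1
--     # Phase 2: fold tokens into (ref_offset, base) mismatches.
--     out = []
--     ref = 0
--     for kind, v in tokens:
--         if kind == 'S':
--             out.append((ref, v))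
--             ref += 1
--         else:
--             ref += v
--     return out
-- ===== Notes on version B (the rewrite author's own statement) =====
-- stated objective: alternative
-- what changed: B splits the work into a tokenizer pass (numbers, '^'-deletions, substitution letters as explicit tokens, parsing digit runs via slicing) followed by a separate fold that accumulates the reference offset, replacing A's single index-walking while loop with inline offset arithmetic and char-code comparisons.
import Mathlib
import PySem

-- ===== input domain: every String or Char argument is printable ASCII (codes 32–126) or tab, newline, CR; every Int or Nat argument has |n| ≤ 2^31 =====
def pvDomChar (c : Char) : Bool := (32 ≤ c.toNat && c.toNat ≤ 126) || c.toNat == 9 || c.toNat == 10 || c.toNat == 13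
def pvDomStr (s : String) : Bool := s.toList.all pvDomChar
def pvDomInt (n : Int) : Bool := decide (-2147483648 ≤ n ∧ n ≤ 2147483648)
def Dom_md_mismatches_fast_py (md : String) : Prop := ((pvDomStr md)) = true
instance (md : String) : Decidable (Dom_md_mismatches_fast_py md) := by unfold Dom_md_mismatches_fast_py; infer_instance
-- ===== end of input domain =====

-- B re-implements the MD-tag mismatch scan as two phases — tokenize into num/deletion/substitution
-- tokens, then fold them into (offset, base) pairs — instead of A's single index-walking loop
-- with inline offset arithmetic (objective: alternative decomposition, same cost).


-- ===== PORT A =====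
-- A scans md with an index; we transliterate over the character list: each branch of A's
-- while-loop in order (digit run, '^' + letter run, single letter, fall-through skip).
def pvAIsDigit (c : Char) : Bool := 48 ≤ c.toNat && c.toNat ≤ 57
def pvAIsAlpha (c : Char) : Bool := (65 ≤ c.toNat && c.toNat ≤ 90) || (97 ≤ c.toNat && c.toNat ≤ 122)

-- A's inner digit loop: num = num*10 + (oc2-48) while digits last
def pvADigits : List Char → Int → Int × List Char
  | [], num => (num, [])
  | c :: cs, num =>
    if pvAIsDigit c then pvADigits cs (num * 10 + ((c.toNat : Int) - 48)) else (num, c :: cs)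

-- A's inner '^' loop: count letters (i - start)
def pvALetters : List Char → Nat → Nat × List Char
  | [], k => (k, [])
  | c :: cs, k =>
    if pvAIsAlpha c then pvALetters cs (k + 1) else (k, c :: cs)

theorem pvADigits_len_le : ∀ (cs : List Char) (num : Int), (pvADigits cs num).2.length ≤ cs.length
  | [], _ => Nat.le_refl _
  | c :: cs, num => by
    unfold pvADigits
    split
    · exact Nat.le_trans (pvADigits_len_le cs _) (Nat.le_succ _)
    · exact Nat.le_refl _

theorem pvALetters_len_le : ∀ (cs : List Char) (k : Nat), (pvALetters cs k).2.length ≤ cs.length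
  | [], _ => Nat.le_refl _
  | c :: cs, k => by
    unfold pvALetters
    split
    · exact Nat.le_trans (pvALetters_len_le cs _) (Nat.le_succ _)
    · exact Nat.le_refl _

-- A's outer while-loop; `out` is the append-accumulator (reversed at the end).
def pvALoop : List Char → Int → List (Int × String) → List (Int × String)
  | [], _, out => out.reverse
  | c :: cs, refOff, out =>
    if pvAIsDigit c then
      -- first inner iteration consumes c itself, then the rest of the digit run
      let p := pvADigits cs ((c.toNat : Int) - 48)
      pvALoop p.2 (refOff + p.1) out
    else if c = '^' then
      let p := pvALetters cs 0
      pvALoop p.2 (refOff + (p.1 : Int)) out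
    else if pvAIsAlpha c then
      pvALoop cs (refOff + 1) ((refOff, String.ofList [c]) :: out)
    else
      pvALoop cs refOff out
  termination_by cs => cs.length
  decreasing_by
  · exact Nat.lt_succ_of_le (pvADigits_len_le cs _)
  · exact Nat.lt_succ_of_le (pvALetters_len_le cs _)
  · exact Nat.lt_succ_self _
  · exact Nat.lt_succ_self _

def md_mismatches_fast_py (md : String) : List (Int × String) :=
  pvALoop md.toList 0 []

-- ===== PORT B =====
-- B (Source B): phase 1 tokenizes the string, phase 2 folds the token list.
inductive MDTok
  | num : Int → MDTok
  | del : Nat → MDTok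
  | sub : Char → MDTok
deriving DecidableEq, Repr

def pvBIsDigit (c : Char) : Bool := 48 ≤ c.toNat && c.toNat ≤ 57
def pvBIsAlpha (c : Char) : Bool := (65 ≤ c.toNat && c.toNat ≤ 90) || (97 ≤ c.toNat && c.toNat ≤ 122)

-- int(md[i:j]) on the digit run, with c already known to be a digit
def pvBNumVal (ds : List Char) (acc : Int) : Int :=
  ds.foldl (fun a d => a * 10 + ((d.toNat : Int) - 48)) acc

def pvBTokenize : List Char → List MDTok
  | [] => []
  | c :: cs =>
    if pvBIsDigit c then
      MDTok.num (pvBNumVal (cs.takeWhile pvBIsDigit) ((c.toNat : Int) - 48))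
        :: pvBTokenize (cs.dropWhile pvBIsDigit)
    else if c = '^' then
      match cs with
      | [] => []
      | d :: ds =>
        if pvBIsAlpha d then
          MDTok.del (1 + (ds.takeWhile pvBIsAlpha).length)
            :: pvBTokenize (ds.dropWhile pvBIsAlpha)
        else
          pvBTokenize (d :: ds)
    else if pvBIsAlpha c then
      MDTok.sub c :: pvBTokenize cs
    else
      pvBTokenize cs
  termination_by cs => cs.length
  decreasing_by
  · exact Nat.lt_succ_of_le (cs.length_dropWhile_le _)
  · exact Nat.lt_succ_of_le (Nat.le_trans (ds.length_dropWhile_le _) (Nat.le_succ _))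
  · exact Nat.lt_succ_self _
  · exact Nat.lt_succ_self _
  · exact Nat.lt_succ_self _

-- phase 2: fold tokens into the output (built front-to-back, no reversal)
def pvBRun : List MDTok → Int → List (Int × String)
  | [], _ => []
  | MDTok.num n :: ts, ref => pvBRun ts (ref + n)
  | MDTok.del k :: ts, ref => pvBRun ts (ref + (k : Int))
  | MDTok.sub c :: ts, ref => (ref, String.ofList [c]) :: pvBRun ts (ref + 1)

def md_mismatches_fast_py_alt (md : String) : List (Int × String) :=
  pvBRun (pvBTokenize md.toList) 0

-- ===== PRECONDITION & SPEC =====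
def Spec_md_mismatches_fast_py (md : String) (out : List (Int × String)) : Prop := out = md_mismatches_fast_py_alt md
instance (md : String) (out : List (Int × String)) : Decidable (Spec_md_mismatches_fast_py md out) := by unfold Spec_md_mismatches_fast_py; infer_instance

-- ===== CLAIM (what is proved, stated in full; the proofs are below) =====
def Claim_equal_md_mismatches_fast_py : Prop := ∀ (md : String), Dom_md_mismatches_fast_py md → Spec_md_mismatches_fast_py md (md_mismatches_fast_py md)

-- ===== LEMMAS AND PROOFS =====

theorem pvADigits_eq : ∀ (cs : List Char) (num : Int),
    pvADigits cs num = (pvBNumVal (cs.takeWhile pvAIsDigit) num, cs.dropWhile pvAIsDigit)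
  | [], num => rfl
  | c :: cs, num => by
    unfold pvADigits
    by_cases h : pvAIsDigit c = true
    · simp [h, List.takeWhile, List.dropWhile, pvADigits_eq cs, pvBNumVal]
    · simp [h, List.takeWhile, List.dropWhile, pvBNumVal]

theorem pvALetters_eq : ∀ (cs : List Char) (k : Nat),
    pvALetters cs k = (k + (cs.takeWhile pvAIsAlpha).length, cs.dropWhile pvAIsAlpha)
  | [], k => rfl
  | c :: cs, k => by
    unfold pvALetters
    by_cases h : pvAIsAlpha c = true
    · simp [h, List.takeWhile, List.dropWhile, pvALetters_eq cs]; omega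
    · simp [h, List.takeWhile, List.dropWhile]

theorem pvAB_alpha : pvAIsAlpha = pvBIsAlpha := rfl

theorem pvMain : ∀ (N : Nat) (cs : List Char), cs.length ≤ N → ∀ (ref : Int) (out : List (Int × String)),
    pvALoop cs ref out = out.reverse ++ pvBRun (pvBTokenize cs) ref := by
  intro N
  induction N with
  | zero =>
    intro cs h ref out
    have : cs = [] := List.length_eq_zero_iff.mp (Nat.le_zero.mp h)
    subst this
    simp [pvALoop, pvBTokenize, pvBRun]
  | succ N ih =>
    intro cs h ref out
    match cs with
    | [] => simp [pvALoop, pvBTokenize, pvBRun]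
    | c :: cs =>
      have hcs : cs.length ≤ N := Nat.le_of_succ_le_succ h
      rw [pvALoop, pvBTokenize.eq_def]
      by_cases hd : pvAIsDigit c = true
      · have hd' : pvBIsDigit c = true := hd
        simp only [hd, hd', if_pos]
        rw [pvADigits_eq, pvBRun]
        exact ih _ (Nat.le_trans (cs.length_dropWhile_le _) hcs) _ _
      · have hd' : pvBIsDigit c = false := by simpa using hd
        simp only [hd, hd', if_neg, Bool.false_eq_true, not_false_iff]
        by_cases hc : c = '^'
        · simp only [hc, if_pos]
          rw [pvALetters_eq]
          match cs with
          | [] => simp [pvALoop, pvBRun, List.takeWhile, List.dropWhile]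
          | d :: ds =>
            by_cases ha : pvAIsAlpha d = true
            · simp only [if_pos, List.takeWhile, List.dropWhile, ha, pvBRun, ← pvAB_alpha]
              rw [ih (ds.dropWhile pvAIsAlpha)
                (Nat.le_trans (ds.length_dropWhile_le _) (Nat.le_of_succ_le hcs)) _ out]
              congr 2
              simp only [List.length_cons]
              push_cast
              ring
            · have ha' : pvBIsAlpha d = false := by simpa using ha
              simp only [ha', List.takeWhile, List.dropWhile, ha, if_neg, Bool.false_eq_true, not_false_iff]
              simpa using ih (d :: ds) hcs ref out
        · simp only [hc, if_neg, not_false_iff]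
          by_cases ha : pvAIsAlpha c = true
          · have ha' : pvBIsAlpha c = true := ha
            simp only [ha, ha', if_pos, pvBRun]
            rw [ih cs hcs (ref + 1) ((ref, String.ofList [c]) :: out)]
            simp
          · have ha' : pvBIsAlpha c = false := by simpa using ha
            simp only [ha, ha', Bool.false_eq_true, if_neg, not_false_iff]
            exact ih cs hcs ref out

-- ===== VERDICT (by name: the statement is the Claim_ definition above) =====
theorem md_mismatches_fast_py_spec : Claim_equal_md_mismatches_fast_py := by
  intro md _
  unfold Spec_md_mismatches_fast_py md_mismatches_fast_py md_mismatches_fast_py_alt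
  simpa using pvMain md.toList.length md.toList (Nat.le_refl _) 0 []
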